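-- pv_equiv track=rewrite | github.com/AnaVGD/Seguridad | elGamalEliptico.py | cacularPunto
-- ===== SOURCE A (Python) =====
-- def cacularPunto(p, a, b):
--   x = []
--   y = []
--   for i in range(p):
--     x.append(((i**3 )+ (a * i) + b) % p)
--     y.append((i**2 ) % p)
--   aux = []
--   iter = 0
--   for i in range(len(x)):
--     for j in range(len(y)):
--       if (x[i] == y[j]):
--         aux.append([i, j])
--         iter += 1
--   return aux
-- ===== SOURCE B (Python) =====
-- def cacularPunto(p, a, b):
--     buckets = {}
--     for j in range(p):
--         buckets.setdefault(j * j % p, []).append(j)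
--     aux = []
--     for i in range(p):
--         for j in buckets.get((i * i * i + a * i + b) % p, []):
--             aux.append([i, j])
--     return aux
-- ===== Notes on version B (the rewrite author's own statement) =====
-- stated objective: faster
-- what changed: Replaced the nested all-pairs scan comparing x[i] to every y[j] with a dict that buckets each j under j*j % p, so each cubic value is looked up once.
import Mathlib
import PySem

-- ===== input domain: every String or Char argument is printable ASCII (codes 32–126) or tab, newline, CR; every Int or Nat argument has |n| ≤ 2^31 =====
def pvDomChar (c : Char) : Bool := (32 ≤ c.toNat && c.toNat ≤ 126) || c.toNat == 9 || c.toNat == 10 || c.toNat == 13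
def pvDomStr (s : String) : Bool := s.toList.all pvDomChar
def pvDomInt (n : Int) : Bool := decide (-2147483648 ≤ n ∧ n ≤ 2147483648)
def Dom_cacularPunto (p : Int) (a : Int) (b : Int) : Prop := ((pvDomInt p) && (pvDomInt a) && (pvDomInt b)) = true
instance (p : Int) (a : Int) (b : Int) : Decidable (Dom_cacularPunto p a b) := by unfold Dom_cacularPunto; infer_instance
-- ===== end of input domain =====

-- B replaces A's quadratic all-pairs scan by a dict bucketing j by j*j % p, then looks each
-- cubic value up once per i: O(p) expected instead of O(p^2) (objective: faster, asymptotic).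

-- ===== PORT A =====
-- literal transliteration of A: build lists x and y, then nested index loops with the
-- (unused) iter counter carried as the second component of the fold state.
def cacularPunto (p : Int) (a : Int) (b : Int) : List (List Int) :=
  let x : List Int := (PySem.List.pyRange 0 p 1).foldl
    (fun acc i => acc ++ [PySem.Int.mod (i ^ 3 + a * i + b) p]) []
  let y : List Int := (PySem.List.pyRange 0 p 1).foldl
    (fun acc i => acc ++ [PySem.Int.mod (i ^ 2) p]) []
  let r : List (List Int) × Int :=
    (PySem.List.pyRange 0 (x.length : Int) 1).foldl
      (fun s i =>
        (PySem.List.pyRange 0 (y.length : Int) 1).foldl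
          (fun t j =>
            if PySem.List.pyGetD x i 0 == PySem.List.pyGetD y j 0 then
              (t.1 ++ [[i, j]], t.2 + 1)
            else t) s)
      (([] : List (List Int)), (0 : Int))
  r.1

-- ===== PORT B =====
-- literal transliteration of B (Source B): buckets.setdefault(k, []).append(j) is
-- Dict.modify k [] (· ++ [j]); then one lookup per i.
def cacularPunto_alt (p : Int) (a : Int) (b : Int) : List (List Int) :=
  let buckets : PySem.Dict Int (List Int) :=
    (PySem.List.pyRange 0 p 1).foldl
      (fun d j => d.modify (PySem.Int.mod (j * j) p) [] (fun l => l ++ [j]))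
      PySem.Dict.empty
  (PySem.List.pyRange 0 p 1).foldl
    (fun acc i =>
      (buckets.getD (PySem.Int.mod (i * i * i + a * i + b) p) []).foldl
        (fun acc2 j => acc2 ++ [[i, j]]) acc)
    []

-- ===== PRECONDITION & SPEC =====
def Spec_cacularPunto (p : Int) (a : Int) (b : Int) (out : List (List Int)) : Prop := out = cacularPunto_alt p a b
instance (p : Int) (a : Int) (b : Int) (out : List (List Int)) : Decidable (Spec_cacularPunto p a b out) := by unfold Spec_cacularPunto; infer_instance

-- ===== CLAIM (what is proved, stated in full; the proofs are below) =====
def Claim_equal_cacularPunto : Prop := ∀ (p : Int) (a : Int) (b : Int), Dom_cacularPunto p a b → Spec_cacularPunto p a b (cacularPunto p a b)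

-- ===== LEMMAS AND PROOFS =====

-- inner loop of A: the pair-state fold appends exactly the filtered, mapped js
theorem pv_inner_fold (cond : Int → Bool) (i : Int) (M : List Int)
    (t : List (List Int) × Int) :
    (M.foldl (fun t j => if cond j then (t.1 ++ [[i, j]], t.2 + 1) else t) t).1
      = t.1 ++ (M.filter cond).map (fun j => ([i, j] : List Int)) := by
  induction M generalizing t with
  | nil => simp
  | cons m M ih =>
    by_cases h : cond m <;> simp [h, ih]

-- outer loop of A on top of pv_inner_fold
theorem pv_outer_fold (cond : Int → Int → Bool) (L M : List Int)
    (s : List (List Int) × Int) :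
    (L.foldl (fun s i =>
        M.foldl (fun t j => if cond i j then (t.1 ++ [[i, j]], t.2 + 1) else t) s) s).1
      = s.1 ++ L.flatMap (fun i => (M.filter (cond i)).map (fun j => ([i, j] : List Int))) := by
  induction L generalizing s with
  | nil => simp
  | cons l L ih => simp [ih, pv_inner_fold]

-- the bucket dict: looking up v yields exactly the js (in order) whose key is v
theorem pv_bucket_getD (key : Int → Int) (L : List Int)
    (d : PySem.Dict Int (List Int)) (v : Int) :
    ((L.foldl (fun d j => d.modify (key j) [] (fun l => l ++ [j])) d).getD v [])
      = d.getD v [] ++ L.filter (fun j => key j == v) := by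
  induction L generalizing d with
  | nil => simp
  | cons m L ih =>
    rw [List.foldl_cons, ih, List.filter_cons]
    by_cases h : key m = v
    · subst h; simp [PySem.Dict.getD_modify_self]
    · simp [PySem.Dict.getD_modify_of_ne _ _ _ (Ne.symm h), h]

-- Int BEq is symmetric
theorem pv_beq_comm (x y : Int) : (x == y) = (y == x) := by
  by_cases h : x = y <;> simp [h]
  exact fun h' => h h'.symm

theorem cacularPunto_eq (p a b : Int) : cacularPunto p a b = cacularPunto_alt p a b := by
  unfold cacularPunto cacularPunto_alt
  simp only [PySem.List.foldl_append_singleton_eq_map]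
  rw [pv_outer_fold]
  have hgetD : ∀ v, ((((PySem.List.pyRange 0 p 1).foldl
      (fun d j => d.modify (PySem.Int.mod (j * j) p) [] (fun l => l ++ [j]))
      PySem.Dict.empty)).getD v []) = (PySem.List.pyRange 0 p 1).filter
        (fun j => PySem.Int.mod (j * j) p == v) := by
    intro v
    rw [pv_bucket_getD (fun j => PySem.Int.mod (j * j) p)]
    rfl
  simp only [hgetD]
  rw [PySem.List.foldl_append_eq_flatMap]
  simp only [List.nil_append, List.length_map, PySem.List.length_pyRange_one, Int.sub_zero]
  have hcast : ((p.toNat : Int)) = if 0 ≤ p then p else 0 := by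
    split <;> omega
  by_cases hp : 0 ≤ p
  · rw [hcast, if_pos hp]
    apply List.flatMap_congr
    intro i hi
    rw [PySem.List.mem_pyRange_one] at hi
    congr 1
    apply List.filter_congr
    intro j hj
    rw [PySem.List.mem_pyRange_one] at hj
    rw [PySem.List.pyGetD_map_pyRange_of_nonneg _ _ _ _ hi.1 hi.2,
        PySem.List.pyGetD_map_pyRange_of_nonneg _ _ _ _ hj.1 hj.2,
        pv_beq_comm]
    norm_num [sq]
    ring_nf
  · rw [hcast, if_neg hp]
    simp [PySem.List.pyRange_one_eq_nil (le_refl (0 : Int)),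
          PySem.List.pyRange_one_eq_nil (le_of_not_ge hp)]

-- ===== VERDICT (by name: the statement is the Claim_ definition above) =====
theorem cacularPunto_spec : Claim_equal_cacularPunto := by
  intro p a b _
  unfold Spec_cacularPunto
  exact cacularPunto_eq p a b
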